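-- pv_equiv track=rewrite | github.com/hockeybuggy/handDrawnMapRecognition | feature_extraction/proximity_statistics.py | get_proximity_counts
-- ===== SOURCE A (Python) =====
-- def get_neighbours(x, y, map_list, directions, edge_class):
--     neighbours = dict()
--     for direction in directions.keys():
--         try:
--             neighbour_pair = (x+directions[direction][0],y+directions[direction][1])
--             if neighbour_pair[0] < 0 or neighbour_pair[1] < 0:
--                 raise IndexError() # do not allow negative indexing
--             neighbours[direction] = get_class(neighbour_pair[0], neighbour_pair[1], map_list)
--         except IndexError:
--             neighbours[direction] = edge_class # If it's out of bounds assign edge class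
--     return neighbours
--
-- def get_class(x, y, map_list):
--     return map_list[y][x]
--
-- def add_new_class_to_proximity_stats(prox_stats, new_class, directions):
--     # Add new class to the other old classes
--     for c_class in prox_stats.keys(): # add the new class to all of the previous keys
--         for direction in directions:
--             prox_stats[c_class][direction][new_class] = 0
--     # Add directions and all classes to new class
--     prox_stats[new_class] = dict()
--     for direction in directions:
--         prox_stats[new_class][direction] = dict()
--         for n_class in prox_stats.keys():
--             prox_stats[new_class][direction][n_class] = 0
--     return prox_stats
--
-- def get_proximity_counts(map_list, edge_class, directions):
--     """ Returns dictionary in the form of: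
--           [cell_class][direction][neighbour_class] = count of occurrences"""
--     proximity_stats = dict()
--     add_new_class_to_proximity_stats(proximity_stats, edge_class, directions) # Add null class
--     for  i in range(0, len(map_list)):
--         for j in range(0,len(map_list[i])):
--             cell_class = get_class(j, i, map_list)
--             if cell_class not in proximity_stats: # class has not been encountered yet.
--                 add_new_class_to_proximity_stats(proximity_stats, cell_class, directions)
--             neighbours = get_neighbours(j, i, map_list, directions, edge_class)
--             for direction in neighbours:
--                 n_class = neighbours[direction]
--                 if n_class not in proximity_stats[cell_class][direction]:
--                     add_new_class_to_proximity_stats(proximity_stats, n_class, directions)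
--                 proximity_stats[cell_class][direction][n_class] += 1
--     return proximity_stats
-- ===== SOURCE B (Python) =====
-- def get_neighbours(x, y, map_list, directions, edge_class):
--     neighbours = dict()
--     for direction in directions.keys():
--         try:
--             neighbour_pair = (x+directions[direction][0],y+directions[direction][1])
--             if neighbour_pair[0] < 0 or neighbour_pair[1] < 0:
--                 raise IndexError() # do not allow negative indexing
--             neighbours[direction] = map_list[neighbour_pair[1]][neighbour_pair[0]]
--         except IndexError:
--             neighbours[direction] = edge_class # If it's out of bounds assign edge class
--     return neighbours
--
-- def get_proximity_counts(map_list, edge_class, directions):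
--     """ Returns dictionary in the form of:
--           [cell_class][direction][neighbour_class] = count of occurrences"""
--     # Pass 1: gather every cell with its neighbour dict.
--     cells = [(map_list[i][j], get_neighbours(j, i, map_list, directions, edge_class))
--              for i in range(len(map_list)) for j in range(len(map_list[i]))]
--     # Pass 2: full class list in first-appearance order (edge class first,
--     # then each cell followed by its neighbours in direction order).
--     classes = []
--     for c in [edge_class] + [x for (cell, ns) in cells for x in [cell] + list(ns.values())]:
--         if c not in classes:
--             classes.append(c)
--     # Pass 3: count (cell_class, direction, neighbour_class) triples once.
--     counts = {}
--     for (cell, ns) in cells: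
--         for (d, n) in ns.items():
--             t = (cell, d, n)
--             counts[t] = counts.get(t, 0) + 1
--     # Build the dense table directly.
--     return {c: {d: {n: counts.get((c, d, n), 0) for n in classes}
--                 for d in directions}
--             for c in classes}
-- ===== Notes on version B (the rewrite author's own statement) =====
-- stated objective: simpler
-- what changed: A discovers classes while counting, repeatedly re-shaping the nested dict via add_new_class_to_proximity_stats; B first collects all cells with their neighbour dicts, derives the complete class list in first-appearance order, counts (cell,direction,neighbour) triples once in a flat dict, and builds the dense result table directly, eliminating incremental registration entirely.
import Mathlib
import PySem

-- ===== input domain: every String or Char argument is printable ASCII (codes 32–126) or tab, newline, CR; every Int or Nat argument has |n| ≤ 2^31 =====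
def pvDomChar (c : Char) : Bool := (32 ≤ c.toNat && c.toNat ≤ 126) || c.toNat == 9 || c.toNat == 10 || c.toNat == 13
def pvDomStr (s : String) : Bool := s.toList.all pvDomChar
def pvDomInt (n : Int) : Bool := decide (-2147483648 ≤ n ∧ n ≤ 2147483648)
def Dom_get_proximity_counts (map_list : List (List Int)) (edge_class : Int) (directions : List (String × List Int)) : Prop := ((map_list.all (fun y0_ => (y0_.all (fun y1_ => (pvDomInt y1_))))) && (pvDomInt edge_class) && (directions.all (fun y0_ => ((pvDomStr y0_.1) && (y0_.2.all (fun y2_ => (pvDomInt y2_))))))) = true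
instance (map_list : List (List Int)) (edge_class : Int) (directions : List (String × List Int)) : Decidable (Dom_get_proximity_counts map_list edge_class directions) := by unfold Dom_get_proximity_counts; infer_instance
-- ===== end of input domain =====

-- B replaces A's discover-and-register-while-counting (add_new_class_to_proximity_stats) by
-- gather-cells / collect-class-list / count-triples-once / build-the-dense-table-directly (simpler decomposition, same cost).

-- ===== PORT A =====
-- get_neighbours: value assigned to neighbours[direction]; every IndexError path (offset list
-- too short, negative index explicitly raised, row/column out of range) yields edge_class.
def pvNeighbourVal (x y : Int) (map_list : List (List Int)) (off : List Int) (edge : Int) : Int :=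
  match PySem.List.pyGet? off 0, PySem.List.pyGet? off 1 with
  | some dx, some dy =>
    if x + dx < 0 ∨ y + dy < 0 then edge            -- explicit raise: no negative indexing
    else match PySem.List.pyGet? map_list (y + dy) with
      | some row =>
        match PySem.List.pyGet? row (x + dx) with
        | some v => v                                -- get_class(nx, ny, map_list)
        | none => edge                               -- IndexError → edge class
      | none => edge                                 -- IndexError → edge class
  | _, _ => edge                                     -- directions[d][0]/[1] IndexError → edge class

-- shared by both ports: Source B contains the same get_neighbours code (get_class inlined)
def pvGetNeighbours (x y : Int) (map_list : List (List Int))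
    (dirs : PySem.Dict String (List Int)) (edge : Int) : PySem.Dict String Int :=
  dirs.keys.foldl
    (fun nb d => nb.insert d (pvNeighbourVal x y map_list ((dirs.get? d).getD []) edge))
    PySem.Dict.empty

-- add_new_class_to_proximity_stats (in-place dict mutation ported as Dict.modify write-backs)
def pvAddNewClass (stats : PySem.Dict Int (PySem.Dict String (PySem.Dict Int Int)))
    (newc : Int) (dirKeys : List String) : PySem.Dict Int (PySem.Dict String (PySem.Dict Int Int)) :=
  -- add the new class to all of the previous keys
  let stats := stats.keys.foldl (fun st c =>
    dirKeys.foldl (fun st d =>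
      st.modify c PySem.Dict.empty (fun dd =>
        dd.modify d PySem.Dict.empty (fun nd => nd.insert newc 0))) st) stats
  -- add directions and all classes (including the new one) to the new class
  let stats := stats.insert newc PySem.Dict.empty
  dirKeys.foldl (fun st d =>
    let st := st.modify newc PySem.Dict.empty (fun dd => dd.insert d PySem.Dict.empty)
    st.keys.foldl (fun st n =>
      st.modify newc PySem.Dict.empty (fun dd =>
        dd.modify d PySem.Dict.empty (fun nd => nd.insert n 0))) st) stats

-- Python receives `directions` as a dict; range(len)-indexed loops ported via enumerate
def get_proximity_counts (map_list : List (List Int)) (edge_class : Int) (directions : List (String × List Int)) : List (Int × List (String × List (Int × Int))) :=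
  let dirs := PySem.Dict.ofList directions
  let dirKeys := dirs.keys
  let stats := pvAddNewClass PySem.Dict.empty edge_class dirKeys     -- add null class
  let stats := (PySem.List.enumerate map_list).foldl (fun stats ir =>
    (PySem.List.enumerate ir.2).foldl (fun stats jc =>
      let cell := jc.2                                -- get_class(j, i, map_list)
      let stats := if stats.contains cell then stats else pvAddNewClass stats cell dirKeys
      let ns := pvGetNeighbours jc.1 ir.1 map_list dirs edge_class
      ns.keys.foldl (fun st d =>
        let n := ((ns.get? d).getD 0)                 -- neighbours[direction], key present
        let st := if ((((st.get? cell).getD PySem.Dict.empty).get? d).getD PySem.Dict.empty).contains n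
          then st else pvAddNewClass st n dirKeys
        st.modify cell PySem.Dict.empty (fun dd =>
          dd.modify d PySem.Dict.empty (fun nd => nd.modify n 0 (· + 1)))) stats) stats) stats
  stats.items.map (fun p => (p.1, p.2.items.map (fun q => (q.1, q.2.items))))

-- ===== PORT B =====
-- Source B: cells pass, class list in first-appearance order, one flat triple count, dense table.
-- The final dict comprehensions have pairwise-distinct keys, so they materialise as these maps.
def get_proximity_counts_alt (map_list : List (List Int)) (edge_class : Int) (directions : List (String × List Int)) : List (Int × List (String × List (Int × Int))) :=
  let dirs := PySem.Dict.ofList directions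
  let cells := (PySem.List.enumerate map_list).flatMap (fun ir =>
    (PySem.List.enumerate ir.2).map (fun jc => (jc.2, pvGetNeighbours jc.1 ir.1 map_list dirs edge_class)))
  let classes : PySem.Set Int :=
    PySem.Set.ofList (edge_class :: cells.flatMap (fun cn => cn.1 :: cn.2.values))
  let counts : PySem.Dict (Int × String × Int) Int := cells.foldl (fun cnt cn =>
    cn.2.items.foldl (fun cnt dn =>
      cnt.insert (cn.1, dn.1, dn.2) (cnt.getD (cn.1, dn.1, dn.2) 0 + 1)) cnt) PySem.Dict.empty
  classes.map (fun c => (c, dirs.keys.map (fun d => (d,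
    classes.map (fun n => (n, counts.getD (c, d, n) 0))))))

-- ===== PRECONDITION & SPEC =====
def Spec_get_proximity_counts (map_list : List (List Int)) (edge_class : Int) (directions : List (String × List Int)) (out : List (Int × List (String × List (Int × Int)))) : Prop := out = get_proximity_counts_alt map_list edge_class directions
instance (map_list : List (List Int)) (edge_class : Int) (directions : List (String × List Int)) (out : List (Int × List (String × List (Int × Int)))) : Decidable (Spec_get_proximity_counts map_list edge_class directions out) := by unfold Spec_get_proximity_counts; infer_instance

-- ===== CLAIM (what is proved, stated in full; the proofs are below) =====
def Claim_equal_get_proximity_counts : Prop := ∀ (map_list : List (List Int)) (edge_class : Int) (directions : List (String × List Int)), Dom_get_proximity_counts map_list edge_class directions → Spec_get_proximity_counts map_list edge_class directions (get_proximity_counts map_list edge_class directions)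

-- ===== LEMMAS AND PROOFS =====

def pvTab {κ ν : Type} [BEq κ] (l : List κ) (val : κ → ν) : PySem.Dict κ ν :=
  ⟨l.map (fun a => (a, val a))⟩

theorem pvTab_keys {κ ν : Type} [BEq κ] (l : List κ) (val : κ → ν) :
    (pvTab l val).keys = l := by
  simp [pvTab, PySem.Dict.keys, Function.comp_def]

theorem pvTab_items {κ ν : Type} [BEq κ] (l : List κ) (val : κ → ν) :
    (pvTab l val).items = l.map (fun a => (a, val a)) := rfl

theorem pvTab_values {κ ν : Type} [BEq κ] (l : List κ) (val : κ → ν) :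
    (pvTab l val).values = l.map val := by
  simp [pvTab, PySem.Dict.values, Function.comp_def]

theorem pvTab_contains {κ ν : Type} [BEq κ] [LawfulBEq κ] (l : List κ) (val : κ → ν) (k : κ) :
    (pvTab l val).contains k = decide (k ∈ l) := by
  simp [pvTab, PySem.Dict.contains_mk, List.any_eq, List.mem_map]

theorem pvTab_congr {κ ν : Type} [BEq κ] (l : List κ) (val val' : κ → ν)
    (h : ∀ a ∈ l, val a = val' a) : pvTab l val = pvTab l val' := by
  apply PySem.Dict.ext
  simp only [pvTab]
  exact List.map_congr_left (fun a ha => by rw [h a ha])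

theorem pvTab_get?_mem {κ ν : Type} [BEq κ] [LawfulBEq κ] (l : List κ) (val : κ → ν)
    (hl : l.Nodup) {a : κ} (ha : a ∈ l) : (pvTab l val).get? a = some (val a) := by
  apply PySem.Dict.get?_of_mem_items
  · exact List.mem_map_of_mem ha
  · rw [pvTab_keys]; exact hl

theorem pvTab_getD_mem {κ ν : Type} [BEq κ] [LawfulBEq κ] (l : List κ) (val : κ → ν)
    (hl : l.Nodup) {a : κ} (ha : a ∈ l) (dflt : ν) : (pvTab l val).getD a dflt = val a := by
  simp [PySem.Dict.getD, pvTab_get?_mem l val hl ha]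

theorem pvTab_insert_mem {κ ν : Type} [BEq κ] [LawfulBEq κ] [DecidableEq κ] (l : List κ)
    (val : κ → ν) {a : κ} (ha : a ∈ l) (v : ν) :
    (pvTab l val).insert a v = pvTab l (fun b => if b = a then v else val b) := by
  apply PySem.Dict.ext
  rw [PySem.Dict.items_insert_of_contains _ _ (by rw [pvTab_contains]; simpa)]
  simp only [pvTab, List.map_map]
  apply List.map_congr_left
  intro b hb
  by_cases h : b = a <;> simp [h]

theorem pvTab_insert_new {κ ν : Type} [BEq κ] [LawfulBEq κ] [DecidableEq κ] (l : List κ)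
    (val : κ → ν) {k : κ} (hk : k ∉ l) (v : ν) :
    (pvTab l val).insert k v = pvTab (l ++ [k]) (fun b => if b = k then v else val b) := by
  apply PySem.Dict.ext
  rw [PySem.Dict.items_insert_of_not_contains _ _ (by rw [pvTab_contains]; simpa)]
  simp only [pvTab, List.map_append, List.map_cons, List.map_nil]
  congr 1
  apply List.map_congr_left
  intro b hb
  have : b ≠ k := fun h => hk (h ▸ hb)
  simp [this]

theorem pvTab_foldl_insert {κ ν : Type} [BEq κ] [LawfulBEq κ] (l : List κ) (v : κ → ν)
    (hl : l.Nodup) :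
    l.foldl (fun d a => d.insert a (v a)) PySem.Dict.empty = pvTab l v := by
  apply PySem.Dict.ext
  rw [show (fun (d : PySem.Dict κ ν) a => d.insert a (v a)) = (fun d a => d.insert (id a) (v a)) from rfl]
  rw [PySem.Dict.items_foldl_insert_fresh l id v PySem.Dict.empty (by simp [PySem.Dict.contains_empty]) (by simpa)]
  simp [pvTab, PySem.Dict.empty]

theorem pvTab_modify_mem {κ ν : Type} [BEq κ] [LawfulBEq κ] [DecidableEq κ] (l : List κ)
    (val : κ → ν) (hl : l.Nodup) {a : κ} (ha : a ∈ l) (dflt : ν) (f : ν → ν) :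
    (pvTab l val).modify a dflt f = pvTab l (fun b => if b = a then f (val a) else val b) := by
  simp [PySem.Dict.modify, pvTab_getD_mem l val hl ha, pvTab_insert_mem l val ha]

theorem pvTab_foldl_modify_at {κ ν β : Type} [BEq κ] [LawfulBEq κ] [DecidableEq κ]
    (C : List κ) (hC : C.Nodup) {c : κ} (hc : c ∈ C) (l : List β) (dflt : ν)
    (u : ν → β → ν) :
    ∀ (rows : κ → ν),
    l.foldl (fun st b => st.modify c dflt (fun v => u v b)) (pvTab C rows)
      = pvTab C (fun c' => if c' = c then l.foldl u (rows c) else rows c') := by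
  induction l with
  | nil => intro rows; simp [List.foldl_nil]; exact (pvTab_congr _ _ _ (by intro a _; by_cases h : a = c <;> simp [h])).symm
  | cons b l ih =>
    intro rows
    simp only [List.foldl_cons]
    rw [pvTab_modify_mem C rows hC hc, ih]
    apply pvTab_congr
    intro a _
    by_cases h : a = c <;> simp [h]

theorem pvTab_foldl_step {κ ν : Type} [BEq κ] [LawfulBEq κ] [DecidableEq κ]
    (C : List κ) (hC : C.Nodup) (G : κ → ν → ν) (step : PySem.Dict κ ν → κ → PySem.Dict κ ν)
    (hstep : ∀ (rows : κ → ν) (a : κ), a ∈ C →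
      step (pvTab C rows) a = pvTab C (fun c' => if c' = a then G a (rows c') else rows c')) :
    ∀ (l : List κ), l.Nodup → (∀ a ∈ l, a ∈ C) → ∀ (rows : κ → ν),
      l.foldl step (pvTab C rows) = pvTab C (fun c => if c ∈ l then G c (rows c) else rows c) := by
  intro l
  induction l with
  | nil => intro _ _ rows; simp
  | cons a l ih =>
    intro hnd hsub rows
    simp only [List.foldl_cons]
    rw [hstep rows a (hsub a (by simp))]
    rw [ih hnd.of_cons (fun b hb => hsub b (by simp [hb]))]
    apply pvTab_congr
    intro b _
    have hal : a ∉ l := (List.nodup_cons.mp hnd).1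
    by_cases hb : b ∈ l
    · have hba : b ≠ a := fun h => hal (h ▸ hb)
      simp [hb, hba]
    · by_cases hba : b = a
      · subst hba; simp [hb]
      · simp [hb, hba]

def pvDense (C : List Int) (K : List String) (f : Int → String → Int → Int) :
    PySem.Dict Int (PySem.Dict String (PySem.Dict Int Int)) :=
  pvTab C (fun c => pvTab K (fun d => pvTab C (fun n => f c d n)))

theorem pvDense_congr (C : List Int) (K : List String) (f f' : Int → String → Int → Int)
    (h : ∀ c ∈ C, ∀ d ∈ K, ∀ n ∈ C, f c d n = f' c d n) : pvDense C K f = pvDense C K f' := by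
  apply pvTab_congr
  intro c hc
  apply pvTab_congr
  intro d hd
  apply pvTab_congr
  intro n hn
  exact h c hc d hd n hn

theorem pvDense_inc (C : List Int) (K : List String) (f : Int → String → Int → Int)
    (hC : C.Nodup) (hK : K.Nodup) {c : Int} (hc : c ∈ C) {d : String} (hd : d ∈ K)
    {n : Int} (hn : n ∈ C) :
    (pvDense C K f).modify c PySem.Dict.empty (fun dd =>
        dd.modify d PySem.Dict.empty (fun nd => nd.modify n 0 (· + 1)))
      = pvDense C K (fun c' d' n' => if c' = c ∧ d' = d ∧ n' = n then f c' d' n' + 1 else f c' d' n') := by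
  unfold pvDense
  rw [pvTab_modify_mem _ _ hC hc]
  rw [pvTab_modify_mem _ _ hK hd]
  rw [pvTab_modify_mem _ _ hC hn]
  apply pvTab_congr
  intro c' hc'
  by_cases h1 : c' = c
  · subst h1
    simp only [if_pos rfl]
    apply pvTab_congr
    intro d' hd'
    by_cases h2 : d' = d
    · subst h2
      simp only [if_pos rfl]
      apply pvTab_congr
      intro n' hn'
      by_cases h3 : n' = n <;> simp [h3]
    · simp only [if_neg h2]
      apply pvTab_congr
      intro n' hn'
      simp [h2]
  · simp only [if_neg h1]
    apply pvTab_congr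
    intro d' _
    apply pvTab_congr
    intro n' _
    simp [h1]

theorem pvDense_inner_contains (C : List Int) (K : List String) (f : Int → String → Int → Int)
    (hC : C.Nodup) (hK : K.Nodup) {c : Int} (hc : c ∈ C) {d : String} (hd : d ∈ K) (n : Int) :
    (((((pvDense C K f).get? c).getD PySem.Dict.empty).get? d).getD PySem.Dict.empty).contains n
      = decide (n ∈ C) := by
  unfold pvDense
  rw [pvTab_get?_mem _ _ hC hc]
  simp only [Option.getD_some]
  rw [pvTab_get?_mem _ _ hK hd]
  simp only [Option.getD_some]
  rw [pvTab_contains]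

theorem pvCount_map_triples (K : List String) (hK : K.Nodup) (cell : Int) (nb : String → Int)
    (c : Int) (d : String) (n : Int) :
    ((K.map (fun d' => (cell, d', nb d'))).count (c, d, n) : Int)
      = if c = cell ∧ d ∈ K ∧ n = nb d then 1 else 0 := by
  induction K with
  | nil => simp
  | cons d0 K ih =>
    have hd0 : d0 ∉ K := (List.nodup_cons.mp hK).1
    rw [List.map_cons, List.count_cons]
    push_cast [ih (List.nodup_cons.mp hK).2]
    by_cases hp : ((cell, d0, nb d0) : Int × String × Int) = (c, d, n)
    · obtain ⟨h1, h2, h3⟩ : cell = c ∧ d0 = d ∧ nb d0 = n := by simpa [Prod.ext_iff] using hp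
      subst h1; subst h2; subst h3
      simp [hd0]
    · have : (((cell, d0, nb d0) : Int × String × Int) == (c, d, n)) = false := by
        simpa using hp
      rw [this]
      simp only [Bool.false_eq_true, if_false, add_zero]
      by_cases h1 : c = cell
      · by_cases h2 : d = d0
        · subst h2 h1
          have : ¬ n = nb d := fun h => hp (by rw [h])
          simp [this, hd0]
        · simp [List.mem_cons, h2]
      · simp [h1]

theorem pvGetNeighbours_tab (x y : Int) (map_list : List (List Int))
    (dirs : PySem.Dict String (List Int)) (edge : Int) (hK : dirs.keys.Nodup) :
    pvGetNeighbours x y map_list dirs edge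
      = pvTab dirs.keys (fun d => pvNeighbourVal x y map_list ((dirs.get? d).getD []) edge) := by
  unfold pvGetNeighbours
  exact pvTab_foldl_insert _ _ hK

theorem pvTab_foldl_modify_keys {κ ν : Type} [BEq κ] [LawfulBEq κ] [DecidableEq κ]
    (C : List κ) (hC : C.Nodup) (dflt : ν) (G : κ → ν → ν) (l : List κ) (hl : l.Nodup)
    (hsub : ∀ a ∈ l, a ∈ C) (rows : κ → ν) :
    l.foldl (fun st a => st.modify a dflt (G a)) (pvTab C rows)
      = pvTab C (fun c => if c ∈ l then G c (rows c) else rows c) := by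
  refine pvTab_foldl_step C hC G _ ?_ l hl hsub rows
  intro rows a ha
  rw [pvTab_modify_mem C rows hC ha]
  apply pvTab_congr
  intro b _
  by_cases h : b = a <;> simp [h]

theorem pvAddPhase2_fold (C' : List Int) (hC' : C'.Nodup) (x : Int) (hx : x ∈ C') :
    ∀ (l D : List String), (D ++ l).Nodup →
    ∀ (rows : Int → PySem.Dict String (PySem.Dict Int Int)),
      rows x = pvTab D (fun _ => pvTab C' (fun _ => (0 : Int))) →
      l.foldl (fun st d =>
          ((st.modify x PySem.Dict.empty (fun dd => dd.insert d PySem.Dict.empty)).keys).foldl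
            (fun st n => st.modify x PySem.Dict.empty (fun dd =>
              dd.modify d PySem.Dict.empty (fun nd => nd.insert n 0)))
            (st.modify x PySem.Dict.empty (fun dd => dd.insert d PySem.Dict.empty))) (pvTab C' rows)
        = pvTab C' (fun c => if c = x then pvTab (D ++ l) (fun _ => pvTab C' (fun _ => 0)) else rows c) := by
  intro l
  induction l with
  | nil =>
    intro D _ rows hrows
    simp only [List.foldl_nil, List.append_nil]
    symm
    apply pvTab_congr
    intro c _
    by_cases h : c = x
    · subst h; simp [hrows]
    · simp [h]
  | cons d l ih =>
    intro D hnd rows hrows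
    have hdD : d ∉ D := by
      intro hdd
      rw [List.nodup_append] at hnd
      exact hnd.2.2 d hdd d (by simp) rfl
    simp only [List.foldl_cons]
    rw [pvTab_modify_mem C' rows hC' hx]
    rw [pvTab_keys]
    rw [pvTab_foldl_modify_at C' hC' hx C' PySem.Dict.empty
      (fun v n => v.modify d PySem.Dict.empty (fun nd => nd.insert n 0)) _]
    have hDd : (D ++ [d]).Nodup := by
      have h2 := hnd
      rw [show (D ++ d :: l) = (D ++ [d]) ++ l by simp] at h2
      exact (List.nodup_append.mp h2).1
    have hrow : (C'.foldl (fun v n => v.modify d PySem.Dict.empty (fun nd => nd.insert n 0))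
          (if x = x then (rows x).insert d PySem.Dict.empty else rows x))
        = pvTab (D ++ [d]) (fun _ => pvTab C' (fun _ => (0 : Int))) := by
      rw [if_pos rfl, hrows, pvTab_insert_new D _ hdD PySem.Dict.empty]
      rw [pvTab_foldl_modify_at (D ++ [d]) hDd (by simp) C' PySem.Dict.empty
        (fun nd n => nd.insert n 0) _]
      apply pvTab_congr
      intro d' hd'
      by_cases h : d' = d
      · subst h
        simp [pvTab_foldl_insert C' (fun _ => (0 : Int)) hC']
      · simp [h]
    rw [ih (D ++ [d]) (by simpa using hnd) _ (by rw [if_pos rfl]; exact hrow)]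
    apply pvTab_congr
    intro c _
    by_cases h : c = x
    · subst h; simp
    · simp [h]

theorem pvAddNewClass_dense (C : List Int) (K : List String) (f : Int → String → Int → Int)
    (hC : C.Nodup) (hK : K.Nodup) {x : Int} (hx : x ∉ C)
    (hf1 : ∀ d n, f x d n = 0) (hf2 : ∀ c d, f c d x = 0) :
    pvAddNewClass (pvDense C K f) x K = pvDense (C ++ [x]) K f := by
  have hC' : (C ++ [x]).Nodup := by
    rw [List.nodup_append]
    refine ⟨hC, List.nodup_singleton x, ?_⟩
    intro a ha b hb heq
    rw [List.mem_singleton] at hb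
    subst heq; subst hb; exact hx ha
  have hxC' : x ∈ C ++ [x] := by simp
  -- phase 1
  have h1 : (pvDense C K f).keys.foldl (fun st c =>
        K.foldl (fun st d =>
          st.modify c PySem.Dict.empty (fun dd =>
            dd.modify d PySem.Dict.empty (fun nd => nd.insert x 0))) st) (pvDense C K f)
      = pvTab C (fun c => pvTab K (fun d => pvTab (C ++ [x]) (fun n => f c d n))) := by
    unfold pvDense
    rw [pvTab_keys]
    rw [pvTab_foldl_step C hC
      (G := fun _ r => K.foldl (fun dd d => dd.modify d PySem.Dict.empty (fun nd => nd.insert x 0)) r)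
      _ ?hstep C hC (fun a ha => ha)]
    case hstep =>
      intro rows c hc
      rw [pvTab_foldl_modify_at C hC hc K PySem.Dict.empty
        (fun v d => v.modify d PySem.Dict.empty (fun nd => nd.insert x 0)) rows]
      apply pvTab_congr
      intro b _
      by_cases h : b = c <;> simp [h]
    apply pvTab_congr
    intro c hc
    simp only [hc, if_pos]
    rw [pvTab_foldl_modify_keys K hK PySem.Dict.empty (fun _ nd => nd.insert x 0) K hK (fun a ha => ha)]
    apply pvTab_congr
    intro d hd
    simp only [hd, if_pos]
    rw [pvTab_insert_new C _ hx 0]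
    apply pvTab_congr
    intro n _
    by_cases h : n = x
    · subst h; simp [hf2]
    · simp [h]
  show (K.foldl (fun st d =>
      ((st.modify x PySem.Dict.empty (fun dd => dd.insert d PySem.Dict.empty)).keys).foldl
        (fun st n => st.modify x PySem.Dict.empty (fun dd =>
          dd.modify d PySem.Dict.empty (fun nd => nd.insert n 0)))
        (st.modify x PySem.Dict.empty (fun dd => dd.insert d PySem.Dict.empty)))
    (((pvDense C K f).keys.foldl (fun st c =>
        K.foldl (fun st d =>
          st.modify c PySem.Dict.empty (fun dd =>
            dd.modify d PySem.Dict.empty (fun nd => nd.insert x 0))) st) (pvDense C K f)).insert x PySem.Dict.empty))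
    = pvDense (C ++ [x]) K f
  rw [h1, pvTab_insert_new C _ hx PySem.Dict.empty]
  rw [pvAddPhase2_fold (C ++ [x]) hC' x hxC' K [] (by simpa using hK) _ (by simp [pvTab, PySem.Dict.empty])]
  apply pvTab_congr
  intro c hc
  by_cases h : c = x
  · subst h
    simp only [if_pos rfl, List.nil_append]
    apply pvTab_congr
    intro d _
    apply pvTab_congr
    intro n _
    exact (hf1 d n).symm
  · simp [h]

theorem pvSet_add_of_mem {C : List Int} {x : Int} (h : x ∈ C) : PySem.Set.add C x = C := by
  simp [PySem.Set.add, PySem.Set.contains, h]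

theorem pvSet_add_of_not_mem {C : List Int} {x : Int} (h : x ∉ C) :
    PySem.Set.add C x = C ++ [x] := by
  simp [PySem.Set.add, PySem.Set.contains, h]

theorem pvStepA_dirs (K : List String) (hK : K.Nodup) (cell : Int) (nb : String → Int) :
    ∀ (l : List String), l.Nodup → (∀ d ∈ l, d ∈ K) →
    ∀ (C : List Int) (f : Int → String → Int → Int), C.Nodup → cell ∈ C →
      (∀ c d n, (c ∉ C ∨ n ∉ C) → f c d n = 0) →
      l.foldl (fun st d =>
          (if ((((st.get? cell).getD PySem.Dict.empty).get? d).getD PySem.Dict.empty).contains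
                (((pvTab K nb).get? d).getD 0)
            then st else pvAddNewClass st (((pvTab K nb).get? d).getD 0) K).modify cell PySem.Dict.empty
            (fun dd => dd.modify d PySem.Dict.empty
              (fun nd => nd.modify (((pvTab K nb).get? d).getD 0) 0 (· + 1)))) (pvDense C K f)
        = pvDense (PySem.Set.update C (l.map nb)) K
            (fun c d n => if c = cell ∧ d ∈ l ∧ n = nb d then f c d n + 1 else f c d n) := by
  intro l
  induction l with
  | nil =>
    intro _ _ C f hC hcell hf
    simp only [List.foldl_nil, List.map_nil]
    symm
    apply pvDense_congr
    intro c _ d _ n _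
    simp
  | cons d0 l ih =>
    intro hnd hsub C f hC hcell hf
    have hd0K : d0 ∈ K := hsub d0 (by simp)
    have hd0l : d0 ∉ l := (List.nodup_cons.mp hnd).1
    simp only [List.foldl_cons]
    rw [pvTab_get?_mem K nb hK hd0K]
    simp only [Option.getD_some]
    rw [pvDense_inner_contains C K f hC hK hcell hd0K]
    by_cases hn : nb d0 ∈ C
    · rw [if_pos (by simpa)]
      rw [pvDense_inc C K f hC hK hcell hd0K hn]
      rw [ih (List.nodup_cons.mp hnd).2 (fun d hd => hsub d (by simp [hd])) C _ hC hcell ?hf1]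
      case hf1 =>
        intro c d n hcn
        have : ¬ (c = cell ∧ d = d0 ∧ n = nb d0) := by
          rintro ⟨rfl, _, rfl⟩
          rcases hcn with h | h
          · exact h hcell
          · exact h hn
        simp only [if_neg this]
        exact hf c d n hcn
      rw [List.map_cons]
      rw [show PySem.Set.update C (nb d0 :: l.map nb)
          = PySem.Set.update (PySem.Set.add C (nb d0)) (l.map nb) from rfl]
      rw [pvSet_add_of_mem hn]
      apply pvDense_congr
      intro c _ d hd n _
      by_cases h1 : c = cell
      · subst h1
        by_cases h2 : d ∈ l
        · have h3 : d ≠ d0 := fun h => hd0l (h ▸ h2)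
          by_cases h4 : n = nb d <;> simp [h2, h3, h4]
        · by_cases h3 : d = d0
          · subst h3
            by_cases h4 : n = nb d <;> simp [h2, h4, hd0l]
          · simp [h2, h3]
      · simp [h1]
    · rw [if_neg (by simpa)]
      rw [pvAddNewClass_dense C K f hC hK hn
        (fun d n => hf _ d n (Or.inl hn)) (fun c d => hf c d _ (Or.inr hn))]
      have hC1 : (C ++ [nb d0]).Nodup := by
        rw [List.nodup_append]
        refine ⟨hC, List.nodup_singleton _, ?_⟩
        intro a ha b hb heq
        rw [List.mem_singleton] at hb
        subst heq; subst hb; exact hn ha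
      have hcell1 : cell ∈ C ++ [nb d0] := by simp [hcell]
      have hn1 : nb d0 ∈ C ++ [nb d0] := by simp
      rw [pvDense_inc (C ++ [nb d0]) K f hC1 hK hcell1 hd0K hn1]
      rw [ih (List.nodup_cons.mp hnd).2 (fun d hd => hsub d (by simp [hd])) (C ++ [nb d0]) _ hC1 hcell1 ?hf2]
      case hf2 =>
        intro c d n hcn
        have : ¬ (c = cell ∧ d = d0 ∧ n = nb d0) := by
          rintro ⟨rfl, _, rfl⟩
          rcases hcn with h | h
          · exact h hcell1
          · exact h hn1
        simp only [if_neg this]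
        refine hf c d n ?_
        rcases hcn with h | h
        · exact Or.inl (fun hc => h (by simp [hc]))
        · exact Or.inr (fun hc => h (by simp [hc]))
      rw [List.map_cons]
      rw [show PySem.Set.update C (nb d0 :: l.map nb)
          = PySem.Set.update (PySem.Set.add C (nb d0)) (l.map nb) from rfl]
      rw [pvSet_add_of_not_mem hn]
      apply pvDense_congr
      intro c _ d hd n _
      by_cases h1 : c = cell
      · subst h1
        by_cases h2 : d ∈ l
        · have h3 : d ≠ d0 := fun h => hd0l (h ▸ h2)
          by_cases h4 : n = nb d <;> simp [h2, h3, h4]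
        · by_cases h3 : d = d0
          · subst h3
            by_cases h4 : n = nb d <;> simp [h2, h4, hd0l]
          · simp [h2, h3]
      · simp [h1]

def pvStepA (K : List String) (st : PySem.Dict Int (PySem.Dict String (PySem.Dict Int Int)))
    (cn : Int × PySem.Dict String Int) : PySem.Dict Int (PySem.Dict String (PySem.Dict Int Int)) :=
  let cell := cn.1
  let st := if st.contains cell then st else pvAddNewClass st cell K
  let ns := cn.2
  ns.keys.foldl (fun st d =>
    let n := ((ns.get? d).getD 0)
    let st := if ((((st.get? cell).getD PySem.Dict.empty).get? d).getD PySem.Dict.empty).contains n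
      then st else pvAddNewClass st n K
    st.modify cell PySem.Dict.empty (fun dd =>
      dd.modify d PySem.Dict.empty (fun nd => nd.modify n 0 (· + 1)))) st

theorem pvStepA_dense (K : List String) (hK : K.Nodup) (cell : Int) (nb : String → Int)
    (C : List Int) (f : Int → String → Int → Int) (hC : C.Nodup)
    (hf : ∀ c d n, (c ∉ C ∨ n ∉ C) → f c d n = 0) :
    pvStepA K (pvDense C K f) (cell, pvTab K nb)
      = pvDense (PySem.Set.update (PySem.Set.add C cell) (K.map nb)) K
          (fun c d n => if c = cell ∧ d ∈ K ∧ n = nb d then f c d n + 1 else f c d n) := by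
  show ((pvTab K nb).keys.foldl (fun st d =>
      (if ((((st.get? cell).getD PySem.Dict.empty).get? d).getD PySem.Dict.empty).contains
            (((pvTab K nb).get? d).getD 0)
        then st else pvAddNewClass st (((pvTab K nb).get? d).getD 0) K).modify cell PySem.Dict.empty
        (fun dd => dd.modify d PySem.Dict.empty
          (fun nd => nd.modify (((pvTab K nb).get? d).getD 0) 0 (· + 1))))
      (if (pvDense C K f).contains cell then pvDense C K f else pvAddNewClass (pvDense C K f) cell K))
    = _
  rw [pvTab_keys]
  rw [show (pvDense C K f).contains cell = decide (cell ∈ C) from pvTab_contains _ _ _]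
  by_cases hcell : cell ∈ C
  · rw [if_pos (by simpa)]
    rw [pvStepA_dirs K hK cell nb K hK (fun d hd => hd) C f hC hcell hf]
    rw [pvSet_add_of_mem hcell]
  · rw [if_neg (by simpa)]
    rw [pvAddNewClass_dense C K f hC hK hcell
      (fun d n => hf _ d n (Or.inl hcell)) (fun c d => hf c d _ (Or.inr hcell))]
    have hC1 : (C ++ [cell]).Nodup := by
      rw [List.nodup_append]
      refine ⟨hC, List.nodup_singleton _, ?_⟩
      intro a ha b hb heq
      rw [List.mem_singleton] at hb
      subst heq; subst hb; exact hcell ha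
    rw [pvStepA_dirs K hK cell nb K hK (fun d hd => hd) (C ++ [cell]) f hC1 (by simp) ?hf1]
    case hf1 =>
      intro c d n hcn
      refine hf c d n ?_
      rcases hcn with h | h
      · exact Or.inl (fun hc => h (by simp [hc]))
      · exact Or.inr (fun hc => h (by simp [hc]))
    rw [pvSet_add_of_not_mem hcell]

theorem pvMain_fold (K : List String) (hK : K.Nodup) :
    ∀ (cells : List (Int × PySem.Dict String Int)),
      (∀ cn ∈ cells, ∃ nb, cn.2 = pvTab K nb) →
      ∀ (C : List Int) (f : Int → String → Int → Int), C.Nodup →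
        (∀ c d n, (c ∉ C ∨ n ∉ C) → f c d n = 0) →
        cells.foldl (pvStepA K) (pvDense C K f)
          = pvDense (cells.foldl (fun C cn => PySem.Set.update (PySem.Set.add C cn.1) cn.2.values) C) K
              (fun c d n => f c d n +
                ((cells.flatMap (fun cn => cn.2.items.map (fun dn => (cn.1, dn.1, dn.2)))).count (c, d, n) : Int)) := by
  intro cells
  induction cells with
  | nil =>
    intro _ C f hC hf
    simp only [List.foldl_nil, List.flatMap_nil]
    symm
    apply pvDense_congr
    intro c _ d _ n _
    simp
  | cons cn cells ih =>
    intro hns C f hC hf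
    obtain ⟨nb, hnb⟩ := hns cn (by simp)
    obtain ⟨cell, ns⟩ := cn
    simp only at hnb
    subst hnb
    simp only [List.foldl_cons]
    rw [pvStepA_dense K hK cell nb C f hC hf]
    have hC1 : (PySem.Set.update (PySem.Set.add C cell) (K.map nb)).Nodup := by
      apply PySem.Set.nodup_update
      by_cases h : cell ∈ C
      · rw [pvSet_add_of_mem h]; exact hC
      · rw [pvSet_add_of_not_mem h]
        rw [List.nodup_append]
        refine ⟨hC, List.nodup_singleton _, ?_⟩
        intro a ha b hb heq
        rw [List.mem_singleton] at hb
        subst heq; subst hb; exact h ha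
    have hmemC1 : ∀ a, a ∈ C ∨ a = cell ∨ a ∈ K.map nb →
        a ∈ PySem.Set.update (PySem.Set.add C cell) (K.map nb) := by
      intro a ha
      rw [PySem.Set.mem_update]
      rcases ha with h | h | h
      · left; rw [PySem.Set.mem_add]; exact Or.inl h
      · left; rw [PySem.Set.mem_add]; exact Or.inr h
      · right; exact h
    rw [ih (fun c hc => hns c (by simp [hc])) _ _ hC1 ?hf1]
    case hf1 =>
      intro c d n hcn
      have hno : ¬ (c = cell ∧ d ∈ K ∧ n = nb d) := by
        rintro ⟨rfl, hdK, rfl⟩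
        rcases hcn with h | h
        · exact h (hmemC1 _ (Or.inr (Or.inl rfl)))
        · exact h (hmemC1 _ (Or.inr (Or.inr (List.mem_map_of_mem hdK))))
      rw [if_neg hno]
      refine hf c d n ?_
      rcases hcn with h | h
      · exact Or.inl (fun hc => h (hmemC1 _ (Or.inl hc)))
      · exact Or.inr (fun hc => h (hmemC1 _ (Or.inl hc)))
    have hvals : (pvTab K nb).values = K.map nb := pvTab_values K nb
    rw [hvals]
    apply pvDense_congr
    intro c _ d hd n _
    rw [List.flatMap_cons, List.count_append]
    push_cast
    rw [show ((pvTab K nb).items.map (fun dn => (cell, dn.1, dn.2)))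
        = K.map (fun d' => (cell, d', nb d')) from by
      simp [pvTab_items, List.map_map, Function.comp_def]]
    rw [pvCount_map_triples K hK cell nb c d n]
    by_cases h : c = cell ∧ d ∈ K ∧ n = nb d
    · simp only [if_pos h]; ring
    · simp only [if_neg h]; ring

theorem pvAssemble (map_list : List (List Int)) (edge_class : Int)
    (dirs : PySem.Dict String (List Int)) (hK : dirs.keys.Nodup) :
    ((PySem.List.enumerate map_list).foldl (fun stats ir =>
        (PySem.List.enumerate ir.2).foldl (fun stats jc =>
          pvStepA dirs.keys stats (jc.2, pvGetNeighbours jc.1 ir.1 map_list dirs edge_class)) stats)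
      (pvAddNewClass PySem.Dict.empty edge_class dirs.keys)).items.map
        (fun p => (p.1, p.2.items.map (fun q => (q.1, q.2.items))))
    = (PySem.Set.ofList (edge_class ::
          ((PySem.List.enumerate map_list).flatMap (fun ir =>
            (PySem.List.enumerate ir.2).map (fun jc =>
              (jc.2, pvGetNeighbours jc.1 ir.1 map_list dirs edge_class)))).flatMap
            (fun cn => cn.1 :: cn.2.values))).map (fun c => (c, dirs.keys.map (fun d => (d,
        (PySem.Set.ofList (edge_class ::
          ((PySem.List.enumerate map_list).flatMap (fun ir =>
            (PySem.List.enumerate ir.2).map (fun jc =>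
              (jc.2, pvGetNeighbours jc.1 ir.1 map_list dirs edge_class)))).flatMap
            (fun cn => cn.1 :: cn.2.values))).map (fun n => (n,
          (((PySem.List.enumerate map_list).flatMap (fun ir =>
            (PySem.List.enumerate ir.2).map (fun jc =>
              (jc.2, pvGetNeighbours jc.1 ir.1 map_list dirs edge_class)))).foldl (fun cnt cn =>
            cn.2.items.foldl (fun cnt dn =>
              cnt.insert (cn.1, dn.1, dn.2) (cnt.getD (cn.1, dn.1, dn.2) 0 + 1)) cnt)
            PySem.Dict.empty).getD (c, d, n) 0)))))) := by
  have hns : ∀ cn ∈ ((PySem.List.enumerate map_list).flatMap (fun ir =>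
      (PySem.List.enumerate ir.2).map (fun jc =>
        (jc.2, pvGetNeighbours jc.1 ir.1 map_list dirs edge_class)))),
      ∃ nb, cn.2 = pvTab dirs.keys nb := by
    intro cn hcn
    simp only [List.mem_flatMap, List.mem_map] at hcn
    obtain ⟨ir, _, jc, _, rfl⟩ := hcn
    exact ⟨_, pvGetNeighbours_tab jc.1 ir.1 map_list dirs edge_class hK⟩
  generalize hcellsdef : ((PySem.List.enumerate map_list).flatMap (fun ir =>
      (PySem.List.enumerate ir.2).map (fun jc =>
        (jc.2, pvGetNeighbours jc.1 ir.1 map_list dirs edge_class)))) = cells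
  rw [hcellsdef] at hns
  have hA : cells.foldl (pvStepA dirs.keys) (pvAddNewClass PySem.Dict.empty edge_class dirs.keys)
      = (PySem.List.enumerate map_list).foldl (fun stats ir =>
          (PySem.List.enumerate ir.2).foldl (fun stats jc =>
            pvStepA dirs.keys stats (jc.2, pvGetNeighbours jc.1 ir.1 map_list dirs edge_class)) stats)
        (pvAddNewClass PySem.Dict.empty edge_class dirs.keys) := by
    rw [← hcellsdef, List.foldl_flatMap]
    simp only [List.foldl_map]
  rw [← hA]
  rw [show pvAddNewClass PySem.Dict.empty edge_class dirs.keys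
      = pvDense ([] ++ [edge_class]) dirs.keys (fun _ _ _ => 0) from
    pvAddNewClass_dense [] dirs.keys (fun _ _ _ => 0) (by simp) hK (by simp)
      (fun _ _ => rfl) (fun _ _ => rfl)]
  rw [pvMain_fold dirs.keys hK cells hns ([] ++ [edge_class]) (fun _ _ _ => 0)
    (by simp) (fun _ _ _ _ => rfl)]
  have hmat : ∀ (C : List Int) (F : Int → String → Int → Int),
      (pvDense C dirs.keys F).items.map (fun p => (p.1, p.2.items.map (fun q => (q.1, q.2.items))))
        = C.map (fun c => (c, dirs.keys.map (fun d => (d, C.map (fun n => (n, F c d n)))))) := by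
    intro C F
    simp [pvDense, pvTab, List.map_map, Function.comp_def]
  rw [hmat]
  have hclasses : PySem.Set.ofList (edge_class :: cells.flatMap (fun cn => cn.1 :: cn.2.values))
      = cells.foldl (fun C cn => PySem.Set.update (PySem.Set.add C cn.1) cn.2.values)
          ([] ++ [edge_class]) := by
    show (cells.flatMap (fun cn => cn.1 :: cn.2.values)).foldl PySem.Set.add
        (PySem.Set.add PySem.Set.empty edge_class) = _
    rw [List.foldl_flatMap]
    rfl
  rw [hclasses]
  have hcounter : (cells.foldl (fun cnt cn =>
        cn.2.items.foldl (fun cnt dn =>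
          cnt.insert (cn.1, dn.1, dn.2) (cnt.getD (cn.1, dn.1, dn.2) 0 + 1)) cnt)
        (PySem.Dict.empty : PySem.Dict (Int × String × Int) Int))
      = PySem.Dict.counter (cells.flatMap (fun cn =>
          cn.2.items.map (fun dn => (cn.1, dn.1, dn.2)))) := by
    rw [← PySem.Dict.foldl_insert_getD_add_one_eq_counter]
    rw [List.foldl_flatMap]
    simp only [List.foldl_map]
  rw [hcounter]
  simp only [PySem.Dict.getD_counter, zero_add]

-- ===== VERDICT (by name: the statement is the Claim_ definition above) =====
theorem get_proximity_counts_spec : Claim_equal_get_proximity_counts := by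
  intro map_list edge_class directions _
  unfold Spec_get_proximity_counts
  exact pvAssemble map_list edge_class (PySem.Dict.ofList directions)
    (PySem.Dict.nodup_keys_ofList directions)
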